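-- pv_equiv track=rewrite | github.com/nekograph/Shell_generator | SphericalDesign.py | sigma_3
-- ===== SOURCE A (Python) =====
-- def sigma_3(n):
--     if not isinstance(n,int) or n<0:
--        raise ValueError("正整数を入力してください")
--
--     sum = 0
--     for i in range(int(n)):
--         if n % (i+1) == 0:
--             sum += (i+1)**3
--
--     return sum
-- ===== SOURCE B (Python) =====
-- def sigma_3(n):
--     if not isinstance(n, int) or n < 0:
--         raise ValueError("正整数を入力してください")
--     total = 0
--     i = 1
--     while i * i <= n:
--         if n % i == 0:
--             total += i ** 3
--             j = n // i
--             if j != i: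
--                 total += j ** 3
--         i += 1
--     return total
-- ===== Notes on version B (the rewrite author's own statement) =====
-- stated objective: faster
-- what changed: B enumerates divisors only up to sqrt(n), adding each divisor i together with its cofactor n//i, instead of A's scan of every integer up to n.
import Mathlib
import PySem

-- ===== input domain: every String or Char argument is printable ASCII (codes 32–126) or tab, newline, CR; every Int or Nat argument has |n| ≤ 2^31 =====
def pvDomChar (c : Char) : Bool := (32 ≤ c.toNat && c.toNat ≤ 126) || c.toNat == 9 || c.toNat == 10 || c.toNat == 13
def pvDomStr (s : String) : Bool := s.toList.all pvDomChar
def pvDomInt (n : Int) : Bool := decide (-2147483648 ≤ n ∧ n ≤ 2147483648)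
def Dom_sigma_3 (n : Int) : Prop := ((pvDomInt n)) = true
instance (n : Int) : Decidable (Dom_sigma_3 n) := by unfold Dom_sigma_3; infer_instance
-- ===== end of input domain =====

-- B replaces A's scan of every integer 1..n by a loop up to sqrt(n) that adds each divisor
-- together with its cofactor n//i (objective: faster).

-- ===== PORT A =====
def sigma_3 (n : Int) : Int :=
  (PySem.List.pyRange 0 n 1).foldl
    (fun s i => if PySem.Int.mod n (i + 1) == 0 then s + (i + 1) ^ 3 else s) 0

-- ===== PORT B =====
-- while i*i <= n: if n % i == 0: total += i**3; j = n // i; if j != i: total += j**3; i += 1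
def sigma3AltLoop (n i acc : Int) : Int :=
  if h : i * i ≤ n then
    sigma3AltLoop n (i + 1)
      (if PySem.Int.mod n i == 0 then
        (if PySem.Int.floordiv n i ≠ i then acc + i ^ 3 + (PySem.Int.floordiv n i) ^ 3
         else acc + i ^ 3)
       else acc)
  else acc
termination_by (n + 1 - i).toNat
decreasing_by
  have h1 : 2 * i ≤ n + 1 := by nlinarith [mul_self_nonneg (i - 1)]
  have h2 : 0 ≤ n := le_trans (mul_self_nonneg i) h
  omega

def sigma_3_alt (n : Int) : Int := sigma3AltLoop n 1 0

-- ===== PRECONDITION & SPEC =====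
-- A raises ValueError exactly for n < 0 (B raises there too); Pre_ admits the nonnegative ints.
def Pre_sigma_3 (n : Int) : Prop := 0 ≤ n
instance (n : Int) : Decidable (Pre_sigma_3 n) := by unfold Pre_sigma_3; infer_instance
def pvWitness_sigma_3 : Int := (12)

def Spec_sigma_3 (n : Int) (out : Int) : Prop := out = sigma_3_alt n
instance (n : Int) (out : Int) : Decidable (Spec_sigma_3 n out) := by unfold Spec_sigma_3; infer_instance

-- ===== CLAIM (what is proved, stated in full; the proofs are below) =====
def Claim_equal_sigma_3 : Prop := ∀ (n : Int), Dom_sigma_3 n → Pre_sigma_3 n → Spec_sigma_3 n (sigma_3 n)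

-- ===== LEMMAS AND PROOFS =====

-- the per-index contribution of B's loop, as a function of the Nat index
def pvG (N k : ℕ) : ℤ :=
  if k ∣ N then (k : ℤ) ^ 3 + (if k * k = N then 0 else ((N / k : ℕ) : ℤ) ^ 3) else 0

lemma pvA_fold (N : ℕ) (l : List ℤ) (a : ℤ) :
    l.foldl (fun s i => if PySem.Int.mod (N : ℤ) (i + 1) == 0 then s + (i + 1) ^ 3 else s) a
      = a + (l.map (fun i => if PySem.Int.mod (N : ℤ) (i + 1) == 0 then (i + 1) ^ 3 else 0)).sum := by
  induction l generalizing a with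
  | nil => simp
  | cons x xs ih =>
    simp only [List.foldl_cons, List.map_cons, List.sum_cons, ih]
    split <;> ring

lemma pvList_sum_range (N : ℕ) (g : ℕ → ℤ) :
    ((List.range N).map g).sum = ∑ k ∈ Finset.range N, g k := by
  induction N with
  | zero => simp
  | succ m ih => simp [List.range_succ, Finset.sum_range_succ, ih]

lemma pvA_eq_sum (N : ℕ) :
    sigma_3 (N : ℤ) = ∑ k ∈ Finset.range N, (if (k + 1) ∣ N then ((k + 1 : ℕ) : ℤ) ^ 3 else 0) := by
  unfold sigma_3
  rw [pvA_fold, PySem.List.pyRange_one]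
  simp only [List.map_map, sub_zero, Int.toNat_natCast, zero_add]
  rw [pvList_sum_range]
  apply Finset.sum_congr rfl
  intro k _
  simp only [Function.comp]
  rw [show ((k : ℤ) + 1) = ((k + 1 : ℕ) : ℤ) by push_cast; ring]
  by_cases hd : (k + 1) ∣ N
  · rw [if_pos (beq_iff_eq.mpr ((PySem.Int.mod_eq_zero_iff_dvd _ _).mpr
      (Int.natCast_dvd_natCast.mpr hd))), if_pos hd]
  · rw [if_neg (fun hb => hd (Int.natCast_dvd_natCast.mp
      ((PySem.Int.mod_eq_zero_iff_dvd _ _).mp (beq_iff_eq.mp hb)))), if_neg hd]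

lemma pvLoop_eq (N : ℕ) (i : ℕ) (hi : 1 ≤ i) (acc : ℤ) :
    sigma3AltLoop (N : ℤ) (i : ℤ) acc = acc + ∑ k ∈ Finset.Icc i (Nat.sqrt N), pvG N k := by
  rw [sigma3AltLoop]
  by_cases h : (i : ℤ) * (i : ℤ) ≤ (N : ℤ)
  · rw [dif_pos h]
    have hii : i * i ≤ N := by exact_mod_cast h
    have him : i ≤ Nat.sqrt N := Nat.le_sqrt.mpr hii
    have hc1 : ((i : ℤ) + 1) = ((i + 1 : ℕ) : ℤ) := by push_cast; ring
    rw [hc1, pvLoop_eq N (i + 1) (by omega)]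
    have hsplit : ∑ k ∈ Finset.Icc i (Nat.sqrt N), pvG N k
        = pvG N i + ∑ k ∈ Finset.Icc (i + 1) (Nat.sqrt N), pvG N k := by
      rw [← Finset.sum_insert (s := Finset.Icc (i + 1) (Nat.sqrt N)) (a := i)
        (by simp only [Finset.mem_Icc]; omega)]
      congr 1
      ext x
      simp only [Finset.mem_insert, Finset.mem_Icc]
      omega
    rw [hsplit]
    have hbody : (if PySem.Int.mod (N : ℤ) (i : ℤ) == 0 then
        (if PySem.Int.floordiv (N : ℤ) (i : ℤ) ≠ (i : ℤ) then
          acc + (i : ℤ) ^ 3 + (PySem.Int.floordiv (N : ℤ) (i : ℤ)) ^ 3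
         else acc + (i : ℤ) ^ 3)
       else acc) = acc + pvG N i := by
      unfold pvG
      by_cases hd : i ∣ N
      · have hmod : PySem.Int.mod (N : ℤ) (i : ℤ) = 0 :=
          (PySem.Int.mod_eq_zero_iff_dvd _ _).mpr (Int.natCast_dvd_natCast.mpr hd)
        rw [if_pos (beq_iff_eq.mpr hmod), if_pos hd, PySem.Int.floordiv_natCast]
        by_cases he : N / i = i
        · have hNi : i * i = N := by
            conv_rhs => rw [← Nat.div_mul_cancel hd, he]
          rw [if_neg (by exact_mod_cast not_not_intro he), if_pos hNi]
          ring
        · have hNi : ¬ i * i = N := fun hcontr => he (by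
            rw [← hcontr]; exact Nat.mul_div_cancel i (by omega))
          rw [if_pos (by exact_mod_cast he), if_neg hNi]
          ring
      · have hmod : ¬ (PySem.Int.mod (N : ℤ) (i : ℤ) == 0) = true := by
          intro hb
          exact hd (Int.natCast_dvd_natCast.mp
            ((PySem.Int.mod_eq_zero_iff_dvd _ _).mp (beq_iff_eq.mp hb)))
        rw [if_neg hmod, if_neg hd]
        ring
    rw [hbody]
    ring
  · rw [dif_neg h]
    have hlt : Nat.sqrt N < i := by
      rcases Nat.lt_or_ge (Nat.sqrt N) i with h' | h'
      · exact h'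
      · exact absurd (by exact_mod_cast Nat.le_sqrt.mp h' : (i : ℤ) * (i : ℤ) ≤ (N : ℤ)) h
    rw [Finset.Icc_eq_empty (by omega)]
    simp
termination_by Nat.sqrt N + 1 - i
decreasing_by omega

lemma pvA_sum_divisors (N : ℕ) :
    (∑ k ∈ Finset.range N, (if (k + 1) ∣ N then ((k + 1 : ℕ) : ℤ) ^ 3 else 0))
      = ∑ d ∈ N.divisors, (d : ℤ) ^ 3 := by
  unfold Nat.divisors
  rw [Finset.sum_filter, Finset.sum_Ico_eq_sum_range]
  simp only [Nat.add_sub_cancel]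
  apply Finset.sum_congr rfl
  intro k _
  rw [add_comm 1 k]

lemma pvCore (N : ℕ) (hN : 0 < N) :
    (∑ k ∈ Finset.Icc 1 (Nat.sqrt N), pvG N k) = ∑ d ∈ N.divisors, (d : ℤ) ^ 3 := by
  have hstepA : (∑ k ∈ Finset.Icc 1 (Nat.sqrt N), pvG N k)
      = ∑ d ∈ N.divisors.filter (fun d => d * d ≤ N),
          ((d : ℤ) ^ 3 + (if d * d = N then 0 else ((N / d : ℕ) : ℤ) ^ 3)) := by
    simp only [pvG]
    rw [← Finset.sum_filter (p := fun k => k ∣ N)]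
    apply Finset.sum_congr
    · ext d
      simp only [Finset.mem_filter, Finset.mem_Icc, Nat.mem_divisors]
      constructor
      · rintro ⟨⟨h1, h2⟩, h3⟩
        exact ⟨⟨h3, by omega⟩, Nat.le_sqrt.mp h2⟩
      · rintro ⟨⟨h1, _⟩, h2⟩
        have hd0 : 0 < d := Nat.pos_of_dvd_of_pos h1 hN
        exact ⟨⟨by omega, Nat.le_sqrt.mpr h2⟩, h1⟩
    · intro x _; rfl
  rw [hstepA, Finset.sum_add_distrib]
  have hstepB : (∑ d ∈ N.divisors.filter (fun d => d * d ≤ N),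
        (if d * d = N then (0 : ℤ) else ((N / d : ℕ) : ℤ) ^ 3))
      = ∑ d ∈ (N.divisors.filter (fun d => d * d ≤ N)).filter (fun d => ¬ d * d = N),
          ((N / d : ℕ) : ℤ) ^ 3 := by
    conv_rhs => rw [Finset.sum_filter]
    apply Finset.sum_congr rfl
    intro d _
    rw [ite_not]
  rw [hstepB]
  have hstepC : (∑ d ∈ (N.divisors.filter (fun d => d * d ≤ N)).filter (fun d => ¬ d * d = N),
        ((N / d : ℕ) : ℤ) ^ 3)
      = ∑ d ∈ N.divisors.filter (fun d => ¬ d * d ≤ N), (d : ℤ) ^ 3 := by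
    apply Finset.sum_nbij' (i := fun d => N / d) (j := fun d => N / d)
    · intro d hd
      simp only [Finset.mem_filter, Nat.mem_divisors] at hd ⊢
      obtain ⟨⟨⟨hdvd, _⟩, hle⟩, hne⟩ := hd
      have hd0 : 0 < d := Nat.pos_of_dvd_of_pos hdvd hN
      have heq : N / d * d = N := Nat.div_mul_cancel hdvd
      have hlt : d < N / d := by
        apply Nat.lt_of_mul_lt_mul_right (a := d)
        rw [heq]; omega
      have hbig : N < N / d * (N / d) := by nlinarith [heq, hlt, hd0]
      exact ⟨⟨Nat.div_dvd_of_dvd hdvd, by omega⟩, by omega⟩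
    · intro d hd
      simp only [Finset.mem_filter, Nat.mem_divisors] at hd ⊢
      obtain ⟨⟨hdvd, _⟩, hgt⟩ := hd
      have hd0 : 0 < d := Nat.pos_of_dvd_of_pos hdvd hN
      have heq : N / d * d = N := Nat.div_mul_cancel hdvd
      have hlt : N / d < d := by
        rcases Nat.lt_or_ge (N / d) d with h' | h'
        · exact h'
        · have : d * d ≤ N / d * d := Nat.mul_le_mul_right d h'
          omega
      have hsq : N / d * (N / d) < N := by
        rcases Nat.eq_zero_or_pos (N / d) with hz | hp
        · rw [hz]; simpa using hN
        · nlinarith [heq, hlt, hp]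
      exact ⟨⟨⟨Nat.div_dvd_of_dvd hdvd, by omega⟩, by omega⟩, by omega⟩
    · intro d hd
      simp only [Finset.mem_filter, Nat.mem_divisors] at hd
      exact Nat.div_div_self hd.1.1.1 (by omega)
    · intro d hd
      simp only [Finset.mem_filter, Nat.mem_divisors] at hd
      exact Nat.div_div_self hd.1.1 (by omega)
    · intro d _; rfl
  rw [hstepC, Finset.sum_filter_add_sum_filter_not]

-- ===== VERDICT (by name: the statement is the Claim_ definition above) =====
theorem sigma_3_spec : Claim_equal_sigma_3 := by
  intro n _ hpre
  unfold Spec_sigma_3 Pre_sigma_3 at *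
  obtain ⟨N, rfl⟩ : ∃ N : ℕ, n = (N : ℤ) := ⟨n.toNat, (Int.toNat_of_nonneg hpre).symm⟩
  unfold sigma_3_alt
  rw [show (1 : ℤ) = ((1 : ℕ) : ℤ) from rfl, pvLoop_eq N 1 le_rfl 0, zero_add, pvA_eq_sum,
    pvA_sum_divisors]
  rcases Nat.eq_zero_or_pos N with h0 | hN
  · subst h0; simp
  · exact (pvCore N hN).symm
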